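-- pv_equiv track=rewrite | github.com/EkinsMatthew/MinesweeperDQN | src/minesweeper.py | __int_to_three_digit_display
-- ===== SOURCE A (Python) =====
-- def __int_to_three_digit_display(number: int) -> tuple[int, int, int]:
--
--     # NOTE: In this notation, the single digit numbers represent themselves,
--     # the negative symbol is represented by a 10, and the blank display is
--     # represented by 11
--
--     # Edges of the function
--     if number > 999:
--         return (9, 9, 9)
--     if number < -99:
--         return (11, 9, 9)
--     if number == 0:
--         return (11, 11, 0)
--
--     # Solution that consumes the number right to left
--     abs_number = abs(number)
--
--     # Start with a blank display
--     display = [11, 11, 11]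
--
--     # Iterate starting on the right
--     i = 2
--     while abs_number != 0:
--         # The number in this spot
--         display[i] = abs_number % 10
--         # Consume the digit
--         abs_number = abs_number // 10
--         # Move once to the left
--         i -= 1
--
--     # Where to put the negative symbol if the number is below zero
--     if number < 0:
--         # In the middle spot for single digit negatives
--         if number > -10:
--             display[1] = 10
--         # In the first slot for double digit negatives
--         else:
--             display[0] = 10
--
--     return tuple(display)
-- ===== SOURCE B (Python) =====
-- def __int_to_three_digit_display(number: int) -> tuple[int, int, int]:
--     if number > 999:
--         return (9, 9, 9)
--     if number < -99:
--         return (11, 9, 9)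
--     digits = [10 if c == '-' else int(c) for c in str(number)]
--     display = [11] * (3 - len(digits)) + digits
--     return tuple(display)
-- ===== Notes on version B (the rewrite author's own statement) =====
-- stated objective: idiomatic
-- what changed: Replaces the right-to-left modulo while-loop and the explicit special-case and sign-placement branches with a single str(number) conversion mapped to display codes and blank-padded to width 3.
import Mathlib
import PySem

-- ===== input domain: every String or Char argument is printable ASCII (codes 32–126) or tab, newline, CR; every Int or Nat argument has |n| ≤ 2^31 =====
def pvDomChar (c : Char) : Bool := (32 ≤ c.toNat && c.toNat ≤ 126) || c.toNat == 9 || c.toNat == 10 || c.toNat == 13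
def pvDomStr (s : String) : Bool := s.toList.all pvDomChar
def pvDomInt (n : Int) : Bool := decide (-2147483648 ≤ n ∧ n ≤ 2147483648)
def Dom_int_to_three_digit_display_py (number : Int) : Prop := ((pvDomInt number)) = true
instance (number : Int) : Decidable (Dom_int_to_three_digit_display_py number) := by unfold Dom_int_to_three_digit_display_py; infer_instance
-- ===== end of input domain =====

-- B replaces A's right-to-left modulo loop and sign-placement branches by converting the
-- number to its decimal string and blank-padding the digit codes to width 3 (objective: idiomatic).

-- ===== PORT A =====
-- the while loop: consume abs_number right to left, writing abs_number % 10 into slot i.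
-- Structural fuel makes the loop total; it is called with fuel absn.toNat + 1, which is
-- always enough since floordiv by 10 strictly shrinks a positive absn, so the '0 fuel'
-- branch is never reached on A's inputs (absn = |number| ≥ 0).
def pvWhileA : Nat → Int → List Int → Int → List Int
  | 0, _, display, _ => display
  | fuel + 1, absn, display, i =>
    if absn ≤ 0 then display
    else pvWhileA fuel (PySem.Int.floordiv absn 10) (display.set i.toNat (PySem.Int.mod absn 10)) (i - 1)

def int_to_three_digit_display_py (number : Int) : Int × Int × Int :=
  if number > 999 then (9, 9, 9)
  else if number < -99 then (11, 9, 9)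
  else if number = 0 then (11, 11, 0)
  else
    let absNumber := |number|
    let display := [11, 11, 11]
    let display := pvWhileA (absNumber.toNat + 1) absNumber display 2
    let display :=
      if number < 0 then
        if number > -10 then display.set 1 10 else display.set 0 10
      else display
    (display.getD 0 0, display.getD 1 0, display.getD 2 0)

-- ===== PORT B =====
-- int(c) on a single decimal-digit char is exactly its code minus 48.
def int_to_three_digit_display_py_alt (number : Int) : Int × Int × Int :=
  if number > 999 then (9, 9, 9)
  else if number < -99 then (11, 9, 9)
  else
    let digits := (PySem.Int.toStr number).toList.map
      (fun c => if c = '-' then (10 : Int) else ((c.toNat : Int) - 48))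
    let display := List.replicate (3 - digits.length) (11 : Int) ++ digits
    (display.getD 0 0, display.getD 1 0, display.getD 2 0)

-- ===== PRECONDITION & SPEC =====
def Spec_int_to_three_digit_display_py (number : Int) (out : Int × Int × Int) : Prop := out = int_to_three_digit_display_py_alt number
instance (number : Int) (out : Int × Int × Int) : Decidable (Spec_int_to_three_digit_display_py number out) := by unfold Spec_int_to_three_digit_display_py; infer_instance

-- ===== CLAIM (what is proved, stated in full; the proofs are below) =====
def Claim_equal_int_to_three_digit_display_py : Prop := ∀ (number : Int), Dom_int_to_three_digit_display_py number → Spec_int_to_three_digit_display_py number (int_to_three_digit_display_py number)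

-- ===== LEMMAS AND PROOFS =====
-- All non-trivial inputs lie in [-99, 999]; check that finite range by kernel evaluation.
set_option maxRecDepth 8000 in
set_option maxHeartbeats 2000000 in
lemma pv_mid_range : ∀ k ∈ List.range 1099,
    int_to_three_digit_display_py ((k : Int) - 99) = int_to_three_digit_display_py_alt ((k : Int) - 99) := by
  decide

-- ===== VERDICT (by name: the statement is the Claim_ definition above) =====
theorem int_to_three_digit_display_py_spec : Claim_equal_int_to_three_digit_display_py := by
  intro n _
  unfold Spec_int_to_three_digit_display_py
  by_cases h1 : n > 999
  · simp [int_to_three_digit_display_py, int_to_three_digit_display_py_alt, h1]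
  by_cases h2 : n < -99
  · simp [int_to_three_digit_display_py, int_to_three_digit_display_py_alt, h1, h2]
  · have hk : n = ((n + 99).toNat : Int) - 99 := by omega
    have hmem : (n + 99).toNat ∈ List.range 1099 := by
      simp [List.mem_range]; omega
    have := pv_mid_range (n + 99).toNat hmem
    rw [hk]
    exact this
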